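-- pv_equiv track=rewrite | github.com/Aasthaengg/IBMdataset | Python_codes/p03673/s039825629.py | solve
-- ===== SOURCE A (Python) =====
-- from collections import deque
--
-- def solve(a):
--     ans = deque()
--
--     for i, aa in enumerate(a):
--         if i % 2 == 0:
--             ans.append(str(aa))
--         else:
--             ans.appendleft(str(aa))
--
--     if len(a) % 2 == 1:
--         ans.reverse()
--
--     return list(ans)
-- ===== SOURCE B (Python) =====
-- def solve(a):
--     n = len(a)
--     h = (n + 1) // 2
--     return [str(a[n - 1 - 2 * j]) if j < h else str(a[2 * j - 2 * h + n % 2])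
--             for j in range(n)]
-- ===== Notes on version B (the rewrite author's own statement) =====
-- stated objective: alternative
-- what changed: B replaces A's deque simulation (per-element parity branch plus a final conditional reverse) by a closed-form index permutation: a single comprehension over output positions j reads a[n-1-2j] in the descending half and a[2j-2h+n%2] in the ascending half, with no deque and no reverse.
import Mathlib
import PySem

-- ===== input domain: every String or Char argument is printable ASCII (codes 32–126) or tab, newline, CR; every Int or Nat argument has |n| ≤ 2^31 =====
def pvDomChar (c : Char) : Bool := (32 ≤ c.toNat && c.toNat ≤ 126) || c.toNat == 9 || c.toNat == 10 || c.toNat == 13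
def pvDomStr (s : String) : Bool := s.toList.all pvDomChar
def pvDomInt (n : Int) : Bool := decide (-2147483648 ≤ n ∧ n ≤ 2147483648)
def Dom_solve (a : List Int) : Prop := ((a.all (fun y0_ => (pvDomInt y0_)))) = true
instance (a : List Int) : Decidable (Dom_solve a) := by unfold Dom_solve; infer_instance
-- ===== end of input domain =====

-- B replaces A's deque simulation by a closed-form index permutation: one comprehension over
-- output positions reads each answer element directly from the input (objective: alternative).

-- ===== PORT A =====
-- the for-loop over enumerate(a): i is the running index, ans the deque
-- (append = ++ [x], appendleft = x :: ·)
def solveLoop : List Int → Int → List String → List String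
  | [], _, ans => ans
  | x :: xs, i, ans =>
      if i % 2 == 0 then solveLoop xs (i + 1) (ans ++ [PySem.Int.toStr x])
      else solveLoop xs (i + 1) (PySem.Int.toStr x :: ans)

def solve (a : List Int) : List String :=
  let ans := solveLoop a 0 []
  if a.length % 2 == 1 then ans.reverse else ans

-- ===== PORT B =====
-- Source B: n = len(a); h = (n+1)//2; one comprehension over range(n) indexing a directly
-- (a[…] with an always-in-range nonnegative index → pyGetD with default 0)
def solve_alt (a : List Int) : List String :=
  let n : Int := a.length
  let h : Int := PySem.Int.floordiv (n + 1) 2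
  (PySem.List.pyRange 0 n 1).map (fun j =>
    if j < h then PySem.Int.toStr (PySem.List.pyGetD a (n - 1 - 2 * j) 0)
    else PySem.Int.toStr (PySem.List.pyGetD a (2 * j - 2 * h + PySem.Int.mod n 2) 0))

-- ===== PRECONDITION & SPEC =====
def Spec_solve (a : List Int) (out : List String) : Prop := out = solve_alt a
instance (a : List Int) (out : List String) : Decidable (Spec_solve a out) := by unfold Spec_solve; infer_instance

-- ===== CLAIM (what is proved, stated in full; the proofs are below) =====
def Claim_equal_solve : Prop := ∀ (a : List Int), Dom_solve a → Spec_solve a (solve a)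

-- ===== LEMMAS AND PROOFS =====

-- every other element of a list, starting with the first
def eo : List Int → List Int
  | [] => []
  | [x] => [x]
  | x :: _ :: xs => x :: eo xs

lemma eo_length : ∀ (l : List Int), (eo l).length = (l.length + 1) / 2 := by
  intro l
  induction l using eo.induct with
  | case1 => simp [eo]
  | case2 x => simp [eo]
  | case3 x y xs ih => simp [eo, ih]; omega

lemma eo_getD : ∀ (l : List Int) (i : Nat) (d : Int), (eo l).getD i d = l.getD (2 * i) d := by
  intro l
  induction l using eo.induct with
  | case1 => intro i d; simp [eo]
  | case2 x => intro i d; cases i <;> simp [eo]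
  | case3 x y xs ih =>
      intro i d
      cases i with
      | zero => simp [eo]
      | succ i =>
          have h2 : 2 * (i + 1) = 2 * i + 1 + 1 := by omega
          simp only [eo, h2, List.getD_cons_succ]
          exact ih i d

lemma tail_getD (l : List Int) (i : Nat) (d : Int) : l.tail.getD i d = l.getD (i + 1) d := by
  cases l <;> simp

lemma eo_getElem' (l : List Int) (j : Nat) (h : j < (eo l).length) : (eo l)[j] = l.getD (2*j) 0 := by
  rw [← List.getD_eq_getElem (eo l) 0 h, eo_getD]

lemma eo_tail_getElem' (l : List Int) (j : Nat) (h : j < (eo l.tail).length) :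
    (eo l.tail)[j] = l.getD (2*j+1) 0 := by
  rw [← List.getD_eq_getElem (eo l.tail) 0 h, eo_getD, tail_getD]

-- characterisation of A's deque loop, for both parities of the running index
lemma solveLoop_eq : ∀ (l : List Int) (i : Int) (ans : List String),
    (i % 2 = 0 → solveLoop l i ans =
      ((eo l.tail).map PySem.Int.toStr).reverse ++ ans ++ (eo l).map PySem.Int.toStr) ∧
    (i % 2 ≠ 0 → solveLoop l i ans =
      ((eo l).map PySem.Int.toStr).reverse ++ ans ++ (eo l.tail).map PySem.Int.toStr) := by
  intro l
  induction l using eo.induct with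
  | case1 => intro i ans; constructor <;> intro _ <;> simp [solveLoop, eo]
  | case2 x =>
      intro i ans
      constructor <;> intro h
      · simp [solveLoop, h, eo]
      · have : (i % 2 == 0) = false := by
          simp only [beq_eq_false_iff_ne, ne_eq]; omega
        simp [solveLoop, this, eo]
  | case3 x y xs ih =>
      intro i ans
      constructor <;> intro h
      · have h0 : (i % 2 == 0) = true := by simp only [beq_iff_eq]; exact h
        have h1 : ((i + 1) % 2 == 0) = false := by
          simp only [beq_eq_false_iff_ne, ne_eq]; omega
        simp only [solveLoop, h0, h1, if_true]
        have := (ih (i + 1 + 1) (PySem.Int.toStr y :: (ans ++ [PySem.Int.toStr x]))).1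
          (by omega)
        rw [this]
        cases xs with
        | nil => simp [eo]
        | cons z zs => simp [eo]
      · have h0 : (i % 2 == 0) = false := by
          simp only [beq_eq_false_iff_ne, ne_eq]; omega
        have h1 : ((i + 1) % 2 == 0) = true := by simp only [beq_iff_eq]; omega
        simp only [solveLoop, h0, h1, if_true]
        have := (ih (i + 1 + 1) ((PySem.Int.toStr x :: ans) ++ [PySem.Int.toStr y])).2
          (by omega)
        rw [this]
        cases xs with
        | nil => simp [eo]
        | cons z zs => simp [eo]
lemma solve_eq_alt (a : List Int) : solve a = solve_alt a := by
  have hA := (solveLoop_eq a 0 []).1 (by norm_num)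
  unfold solve solve_alt
  simp only [hA, List.append_nil, PySem.List.pyRange_one, Int.sub_zero,
    Int.toNat_natCast, zero_add]
  have hfd : PySem.Int.floordiv ((a.length : Int) + 1) 2 = (((a.length + 1) / 2 : Nat) : Int) := by
    have := PySem.Int.floordiv_natCast (a.length + 1) 2
    push_cast at this ⊢
    exact this
  have hmd : PySem.Int.mod ((a.length : Int)) 2 = ((a.length % 2 : Nat) : Int) := by
    have := PySem.Int.mod_natCast a.length 2
    push_cast at this ⊢
    exact this
  rw [hfd, hmd, List.map_map]
  have hL : (eo a.tail).length = a.length / 2 := by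
    rw [eo_length, List.length_tail]; omega
  have hY : (eo a).length = (a.length + 1) / 2 := eo_length a
  by_cases hp : a.length % 2 = 1
  · rw [if_pos (by simp [hp])]
    apply List.ext_getElem
    · simp [hL, hY]; omega
    · intro i h1 h2
      have hiN : i < a.length := by simpa using h2
      simp only [List.getElem_map, List.getElem_range, Function.comp]
      rcases Nat.lt_or_ge i ((a.length + 1) / 2) with hi | hi
      · rw [if_pos (by exact_mod_cast hi)]
        rw [show ((a.length:Int) - 1 - 2*(i:Int)) = ((a.length - 1 - 2*i : Nat) : Int) from by omega,
          PySem.List.pyGetD_natCast]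
        simp only [List.getElem_reverse, List.getElem_append, List.length_reverse,
          List.length_map, List.length_append, hL, hY]
        rw [dif_neg (by omega)]
        simp only [List.getElem_map, eo_getElem']
        congr 2
        omega
      · rw [if_neg (by exact_mod_cast Nat.not_lt.mpr hi)]
        rw [show (2*(i:Int) - 2*((((a.length + 1) / 2 : Nat)):Int) + ((a.length % 2 : Nat):Int)) = ((2*i - 2*((a.length+1)/2) + a.length % 2 : Nat) : Int) from by omega,
          PySem.List.pyGetD_natCast]
        simp only [List.getElem_reverse, List.getElem_append, List.length_reverse,
          List.length_map, List.length_append, hL, hY]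
        rw [dif_pos (by omega)]
        simp only [List.getElem_map, eo_tail_getElem']
        congr 2
        omega
  · rw [if_neg (by simp [hp])]
    apply List.ext_getElem
    · simp [hL, hY]; omega
    · intro i h1 h2
      have hiN : i < a.length := by simpa using h2
      simp only [List.getElem_map, List.getElem_range, Function.comp]
      rcases Nat.lt_or_ge i ((a.length + 1) / 2) with hi | hi
      · rw [if_pos (by exact_mod_cast hi)]
        rw [show ((a.length:Int) - 1 - 2*(i:Int)) = ((a.length - 1 - 2*i : Nat) : Int) from by omega,
          PySem.List.pyGetD_natCast]
        simp only [List.getElem_append, List.length_reverse, List.length_map, hL]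
        rw [dif_pos (by omega)]
        simp only [List.getElem_reverse, List.length_map, List.getElem_map, hL, eo_tail_getElem']
        congr 2
        omega
      · rw [if_neg (by exact_mod_cast Nat.not_lt.mpr hi)]
        rw [show (2*(i:Int) - 2*((((a.length + 1) / 2 : Nat)):Int) + ((a.length % 2 : Nat):Int)) = ((2*i - 2*((a.length+1)/2) + a.length % 2 : Nat) : Int) from by omega,
          PySem.List.pyGetD_natCast]
        simp only [List.getElem_append, List.length_reverse, List.length_map, hL]
        rw [dif_neg (by omega)]
        simp only [List.getElem_map, eo_getElem']
        congr 2
        omega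

-- ===== VERDICT (by name: the statement is the Claim_ definition above) =====
theorem solve_spec : Claim_equal_solve := by
  intro a _
  exact solve_eq_alt a
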